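-- pv_equiv track=rewrite | github.com/hardy1109/ACC45DAYSOFCODE-2024 | Day 13 - REMOVECARDS.py | min_moves_to_unify_cards
-- ===== SOURCE A (Python) =====
-- def min_moves_to_unify_cards(test_cases):
--     results = []
--
--     for case in test_cases:
--         N, cards = case
--         frequency = {}
--
--         for card in cards:
--             if card in frequency:
--                 frequency[card] += 1
--             else:
--                 frequency[card] = 1
--
--         max_frequency = max(frequency.values())
--         min_moves = N - max_frequency
--         results.append(min_moves)
--
--     return results
-- ===== SOURCE B (Python) =====
-- def min_moves_to_unify_cards(test_cases):
--     results = []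
--     for n, cards in test_cases:
--         # sort, then scan for the longest run of equal adjacent values
--         best = 0
--         run = 0
--         prev = None
--         for x in sorted(cards):
--             run = run + 1 if x == prev else 1
--             prev = x
--             best = max(best, run)
--         results.append(n - best)
--     return results
-- ===== Notes on version B (the rewrite author's own statement) =====
-- stated objective: alternative
-- what changed: B replaces A's frequency dictionary by sorting each card list and scanning for the longest run of equal adjacent values (max frequency = longest run in the sorted list).
import Mathlib
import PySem

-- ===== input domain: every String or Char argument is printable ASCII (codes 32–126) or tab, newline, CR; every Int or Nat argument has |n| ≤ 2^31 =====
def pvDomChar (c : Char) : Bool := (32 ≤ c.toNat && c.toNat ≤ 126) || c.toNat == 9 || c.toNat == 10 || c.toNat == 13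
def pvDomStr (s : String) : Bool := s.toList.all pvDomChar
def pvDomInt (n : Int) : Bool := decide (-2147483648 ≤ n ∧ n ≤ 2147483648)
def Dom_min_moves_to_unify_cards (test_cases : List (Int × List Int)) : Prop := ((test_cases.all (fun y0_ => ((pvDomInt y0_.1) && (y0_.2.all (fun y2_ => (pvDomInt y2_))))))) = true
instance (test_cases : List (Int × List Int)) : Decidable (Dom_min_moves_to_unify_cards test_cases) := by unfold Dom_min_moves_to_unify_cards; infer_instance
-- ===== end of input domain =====

-- B replaces A's frequency dictionary by sorting each card list and scanning for the
-- longest run of equal adjacent values (alternative algorithm, same results).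


-- ===== PORT A =====
def min_moves_to_unify_cards (test_cases : List (Int × List Int)) : List Int :=
  test_cases.foldl (fun results case =>
    let frequency := case.2.foldl (fun d card =>
      if d.contains card then d.modify card 0 (· + 1)
      else d.insert card (1 : Int)) PySem.Dict.empty
    -- max(frequency.values()): raises ValueError when cards is empty; excluded by Pre_,
    -- the .getD 0 default is never reached inside Pre_
    let max_frequency := (PySem.List.max? frequency.values (fun x => x)).getD 0
    results ++ [case.1 - max_frequency]) []

-- ===== PORT B =====
-- one step of B's run scan: state (best, run, prev), next card x
def pvScanStep (st : Int × Int × Option Int) (x : Int) : Int × Int × Option Int :=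
  let run := if st.2.2 = some x then st.2.1 + 1 else 1
  (max st.1 run, run, some x)

def min_moves_to_unify_cards_alt (test_cases : List (Int × List Int)) : List Int :=
  test_cases.foldl (fun results case =>
    let scan := (PySem.List.sorted case.2 (fun x => x) false).foldl pvScanStep
      ((0 : Int), (0 : Int), (none : Option Int))
    results ++ [case.1 - scan.1]) []

-- ===== PRECONDITION & SPEC =====
-- Pre_ excludes cases with an empty card list: there A raises ValueError (max of an empty sequence).
def Pre_min_moves_to_unify_cards (test_cases : List (Int × List Int)) : Prop :=
  ∀ case ∈ test_cases, case.2 ≠ []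
instance (test_cases : List (Int × List Int)) : Decidable (Pre_min_moves_to_unify_cards test_cases) := by unfold Pre_min_moves_to_unify_cards; infer_instance
def pvWitness_min_moves_to_unify_cards : (List (Int × List Int)) := [(3, [1, 2, 1]), (2, [5, 5])]

def Spec_min_moves_to_unify_cards (test_cases : List (Int × List Int)) (out : List Int) : Prop := out = min_moves_to_unify_cards_alt test_cases
instance (test_cases : List (Int × List Int)) (out : List Int) : Decidable (Spec_min_moves_to_unify_cards test_cases out) := by unfold Spec_min_moves_to_unify_cards; infer_instance

-- ===== CLAIM (what is proved, stated in full; the proofs are below) =====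
def Claim_equal_min_moves_to_unify_cards : Prop := ∀ (test_cases : List (Int × List Int)), Dom_min_moves_to_unify_cards test_cases → Pre_min_moves_to_unify_cards test_cases → Spec_min_moves_to_unify_cards test_cases (min_moves_to_unify_cards test_cases)

-- ===== LEMMAS AND PROOFS =====

-- the maximum count of any value in l (0 for the empty list)
def pvM (l : List Int) : Int :=
  ((PySem.List.dedup l).map (fun v => (l.count v : Int))).foldl max 0

theorem pvM_nonneg (l : List Int) : 0 ≤ pvM l :=
  (PySem.List.le_foldl_max _ 0).1

theorem count_le_pvM (l : List Int) (a : Int) (h : a ∈ l) : (l.count a : Int) ≤ pvM l := by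
  apply (PySem.List.le_foldl_max _ 0).2
  exact List.mem_map.mpr ⟨a, (PySem.List.mem_dedup _ _).mpr h, rfl⟩

theorem pvM_eq_count (l : List Int) (h : l ≠ []) : ∃ a ∈ l, pvM l = l.count a := by
  rcases PySem.List.foldl_max_mem ((PySem.List.dedup l).map (fun v => (l.count v : Int))) 0 with h0 | hmem
  · -- pvM l = 0 is impossible: the head has count ≥ 1
    exfalso
    rcases l with _ | ⟨c, t⟩
    · exact h rfl
    · have h1 : 1 ≤ ((c :: t).count c : Int) := by
        have := List.count_pos_iff.mpr (List.mem_cons_self (l := t) (a := c))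
        exact_mod_cast this
      have h2 := count_le_pvM (c :: t) c (List.mem_cons_self)
      have : pvM (c :: t) = 0 := h0
      omega
  · rcases List.mem_map.mp hmem with ⟨a, ha, hc⟩
    exact ⟨a, (PySem.List.mem_dedup _ _).mp ha, hc.symm⟩

theorem pvM_perm (l l' : List Int) (h : l.Perm l') : pvM l = pvM l' := by
  rcases eq_or_ne l [] with rfl | hne
  · rw [h.nil_eq.symm]
  · have hne' : l' ≠ [] := fun he => hne (by subst he; exact h.eq_nil)
    obtain ⟨a, ha, hA⟩ := pvM_eq_count l hne
    obtain ⟨b, hb, hB⟩ := pvM_eq_count l' hne'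
    have h1 : pvM l ≤ pvM l' := by
      rw [hA, h.count_eq a]
      exact count_le_pvM l' a (h.mem_iff.mp ha)
    have h2 : pvM l' ≤ pvM l := by
      rw [hB, ← h.count_eq b]
      exact count_le_pvM l b (h.mem_iff.mpr hb)
    omega

theorem pvM_repl_append (k : Nat) (x : Int) (m : List Int) (hk : 1 ≤ k) (hx : x ∉ m) :
    pvM (List.replicate k x ++ m) = max (k : Int) (pvM m) := by
  have hcx : ((List.replicate k x ++ m).count x : Int) = (k : Int) := by
    rw [List.count_append, List.count_replicate_self, List.count_eq_zero_of_not_mem hx]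
    simp
  have hcw : ∀ w ∈ m, (List.replicate k x ++ m).count w = m.count w := by
    intro w hw
    have hwx : w ≠ x := fun he => hx (he ▸ hw)
    rw [List.count_append, List.count_replicate]
    have : ¬ (x = w) := fun he => hwx he.symm
    simp [this]
  have hxl : x ∈ List.replicate k x ++ m := by
    exact List.mem_append.mpr (Or.inl (List.mem_replicate.mpr ⟨by omega, rfl⟩))
  have hne : List.replicate k x ++ m ≠ [] := fun he => by simp [he] at hxl
  -- ≤ : the maximal count is x's (= k) or some w ∈ m's (≤ pvM m)
  obtain ⟨a, ha, hA⟩ := pvM_eq_count _ hne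
  have hle : pvM (List.replicate k x ++ m) ≤ max (k : Int) (pvM m) := by
    rcases List.mem_append.mp ha with haL | haM
    · have : a = x := (List.mem_replicate.mp haL).2
      subst this; rw [hA, hcx]; exact le_max_left _ _
    · have : pvM (List.replicate k x ++ m) = (m.count a : Int) := by
        rw [hA, hcw a haM]
      rw [this]
      exact le_trans (count_le_pvM m a haM) (le_max_right _ _)
  -- ≥ : k is x's count, and every count in m occurs in the concatenation
  have hge1 : (k : Int) ≤ pvM (List.replicate k x ++ m) := by
    rw [← hcx]; exact count_le_pvM _ x hxl
  have hge2 : pvM m ≤ pvM (List.replicate k x ++ m) := by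
    rcases eq_or_ne m [] with rfl | hmne
    · have := pvM_nonneg (List.replicate k x ++ ([] : List Int))
      simpa [pvM] using this
    · obtain ⟨b, hb, hB⟩ := pvM_eq_count m hmne
      rw [hB, ← hcw b hb]
      exact count_le_pvM _ b (List.mem_append.mpr (Or.inr hb))
  omega

-- A's if/else frequency loop is exactly Counter(cards)
theorem freq_eq_counter (cards : List Int) :
    cards.foldl (fun d card =>
      if d.contains card then d.modify card 0 (· + 1)
      else d.insert card (1 : Int)) PySem.Dict.empty = PySem.Dict.counter cards := by
  rw [PySem.Dict.counter_eq_foldl]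
  apply PySem.List.foldl_congr_mem
  intro d card _
  by_cases h : d.contains card
  · simp [h]
  · have hg : d.get? card = none := by
      rw [PySem.Dict.get?_eq_none_iff_contains]; simpa using h
    simp [h, PySem.Dict.modify, PySem.Dict.getD, hg]

-- A's max(frequency.values()) is the maximum count, for nonempty cards
theorem values_counter_eq (cards : List Int) :
    (PySem.Dict.counter cards).values
      = (PySem.List.dedup cards).map (fun v => (cards.count v : Int)) := by
  simp [PySem.Dict.values, PySem.Dict.items_counter, PySem.List.dedup_eq_ofList,
    List.map_map, Function.comp_def]

theorem a_max_eq_pvM (cards : List Int) (h : cards ≠ []) :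
    (PySem.List.max? (PySem.Dict.counter cards).values (fun x => x)).getD 0 = pvM cards := by
  rw [values_counter_eq]
  have hcne : (PySem.List.dedup cards).map (fun v => (cards.count v : Int)) ≠ [] := by
    rcases cards with _ | ⟨c, t⟩
    · exact absurd rfl h
    · have : c ∈ PySem.List.dedup (c :: t) :=
        (PySem.List.mem_dedup _ _).mpr (List.mem_cons_self)
      intro he
      rw [List.map_eq_nil_iff.mp he] at this
      simp at this
  rcases hmax : PySem.List.max?
      ((PySem.List.dedup cards).map (fun v => (cards.count v : Int))) (fun x => x) with _ | m
  · exact absurd ((PySem.List.max?_eq_none_iff _ _).mp hmax) hcne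
  · have hm := PySem.List.max?_mem hmax
    have hmax' := PySem.List.max?_isMax hmax
    have h1 : m ≤ pvM cards := by
      exact (PySem.List.le_foldl_max _ 0).2 m hm
    have h2 : pvM cards ≤ m := by
      rcases PySem.List.foldl_max_mem
          ((PySem.List.dedup cards).map (fun v => (cards.count v : Int))) 0 with h0 | hmem
      · rcases List.mem_map.mp hm with ⟨a, _, hc⟩
        have hm0 : (0 : Int) ≤ m := hc ▸ Int.natCast_nonneg _
        have h0' : pvM cards = 0 := h0
        omega
      · exact hmax' _ hmem
    simp only [Option.getD_some]
    omega

-- B's run scan over a sorted tail: invariant of the (best, run, prev) state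
theorem scan_spec (s : List Int) (x : Int) (k : Nat) (b : Int)
    (hs : (x :: s).Pairwise (· ≤ ·)) (hk : 1 ≤ k) (hb : (k : Int) ≤ b) :
    (s.foldl pvScanStep (b, (k : Int), some x)).1
      = max b (pvM (List.replicate k x ++ s)) := by
  induction s generalizing x k b with
  | nil =>
    have : pvM (List.replicate k x ++ []) = (k : Int) := by
      have h1 := pvM_repl_append k x [] hk (by simp)
      have h0 : pvM ([] : List Int) = 0 := by simp [pvM, PySem.List.dedup]
      rw [h0] at h1
      rw [List.append_nil] at h1 ⊢
      omega
    rw [List.append_nil] at this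
    simp only [List.foldl_nil]
    rw [List.append_nil, this]
    omega
  | cons y t ih =>
    by_cases hxy : x = y
    · subst hxy
      have hstep : pvScanStep (b, (k : Int), some x) x
          = (max b ((k : Int) + 1), (k : Int) + 1, some x) := by
        simp [pvScanStep]
      have hPW : (x :: t).Pairwise (· ≤ ·) := by
        rcases List.pairwise_cons.mp hs with ⟨hx1, h2⟩
        rcases List.pairwise_cons.mp h2 with ⟨hx2, h3⟩
        exact List.pairwise_cons.mpr ⟨fun z hz => hx2 z hz, h3⟩
      have hcast : ((k : Int) + 1) = ((k + 1 : Nat) : Int) := by push_cast; ring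
      have hIH := ih x (k + 1) (max b ((k : Int) + 1)) hPW (by omega)
        (by push_cast; omega)
      rw [hcast] at hIH
      rw [List.foldl_cons, hstep, hcast, hIH]
      have hlist : List.replicate (k + 1) x ++ t = List.replicate k x ++ (x :: t) := by
        rw [List.replicate_succ']
        simp
      rw [hlist]
      -- pvM ≥ k+1 : x occurs at least k+1 times
      have hxin : x ∈ List.replicate k x ++ (x :: t) := by simp
      have hcnt := count_le_pvM (List.replicate k x ++ (x :: t)) x hxin
      have hcv : (k : Int) + 1 ≤ ((List.replicate k x ++ (x :: t)).count x : Int) := by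
        rw [List.count_append, List.count_replicate_self]
        have : 1 ≤ (x :: t).count x := List.count_pos_iff.mpr (List.mem_cons_self)
        push_cast
        omega
      omega
    · have hstep : pvScanStep (b, (k : Int), some x) y = (max b 1, 1, some y) := by
        simp [pvScanStep, hxy]
      rcases List.pairwise_cons.mp hs with ⟨hx1, h2⟩
      rcases List.pairwise_cons.mp h2 with ⟨hy1, h3⟩
      have hxny : x ∉ y :: t := by
        intro hmem
        rcases List.mem_cons.mp hmem with he | hmt
        · exact hxy he
        · have hxy' : x ≤ y := hx1 y (List.mem_cons_self)
          have hyx : y ≤ x := hy1 x hmt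
          exact hxy (le_antisymm hxy' hyx)
      have hIH := ih y 1 (max b 1) h2 (le_refl 1) (by norm_num)
      have hone : ((1 : Nat) : Int) = (1 : Int) := by norm_num
      rw [hone] at hIH
      rw [List.foldl_cons, hstep, hIH]
      have hrepl1 : List.replicate 1 y ++ t = y :: t := by simp
      rw [hrepl1, pvM_repl_append k x (y :: t) hk hxny]
      have hM := pvM_nonneg (y :: t)
      omega

-- B's whole per-case scan computes A's max frequency, for nonempty cards
theorem scan_eq_a_max (cards : List Int) (h : cards ≠ []) :
    ((PySem.List.sorted cards (fun x => x) false).foldl pvScanStep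
        ((0 : Int), (0 : Int), (none : Option Int))).1
      = (PySem.List.max? (PySem.Dict.counter cards).values (fun x => x)).getD 0 := by
  rcases hs : PySem.List.sorted cards (fun x => x) false with _ | ⟨x, s⟩
  · exact absurd ((PySem.List.sorted_eq_nil_iff _ _ _).mp hs) h
  · have hPW : (x :: s).Pairwise (· ≤ ·) := by
      have := PySem.List.sorted_pairwise cards (fun x => x)
      rw [hs] at this
      simpa using this
  -- first iteration: prev = none, so run = 1, best = 1
    have hstep : pvScanStep ((0 : Int), (0 : Int), (none : Option Int)) x
        = ((1 : Int), (1 : Int), some x) := by simp [pvScanStep]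
    have hspec := scan_spec s x 1 1 hPW (le_refl 1) (by norm_num)
    have hone : ((1 : Nat) : Int) = (1 : Int) := by norm_num
    rw [hone] at hspec
    rw [List.foldl_cons, hstep, hspec]
    have hrepl1 : List.replicate 1 x ++ s = x :: s := by simp
    rw [hrepl1]
    have hperm : (x :: s).Perm cards := by
      have := PySem.List.sorted_perm cards (fun x => x) false
      rw [hs] at this
      exact this
    rw [pvM_perm _ _ hperm, a_max_eq_pvM cards h]
    have h1 : (1 : Int) ≤ pvM cards := by
      rw [← pvM_perm _ _ hperm]
      have hx : x ∈ x :: s := List.mem_cons_self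
      have := count_le_pvM (x :: s) x hx
      have hc : 1 ≤ (x :: s).count x := List.count_pos_iff.mpr hx
      push_cast at this ⊢
      omega
    omega

-- the accumulator invariant of the two outer results-loops
theorem outer_foldl (tcs : List (Int × List Int)) (acc : List Int)
    (hpre : ∀ case ∈ tcs, case.2 ≠ []) :
    tcs.foldl (fun results case =>
      let frequency := case.2.foldl (fun d card =>
        if d.contains card then d.modify card 0 (· + 1)
        else d.insert card (1 : Int)) PySem.Dict.empty
      let max_frequency := (PySem.List.max? frequency.values (fun x => x)).getD 0
      results ++ [case.1 - max_frequency]) acc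
    = tcs.foldl (fun results case =>
      let scan := (PySem.List.sorted case.2 (fun x => x) false).foldl pvScanStep
        ((0 : Int), (0 : Int), (none : Option Int))
      results ++ [case.1 - scan.1]) acc := by
  apply PySem.List.foldl_congr_mem
  intro results case hmem
  have hne : case.2 ≠ [] := hpre case hmem
  simp only [freq_eq_counter, scan_eq_a_max case.2 hne]

-- ===== VERDICT (by name: the statements are the Claim_ definitions above) =====
theorem min_moves_to_unify_cards_spec : Claim_equal_min_moves_to_unify_cards := by
  intro tcs _ hpre
  unfold Spec_min_moves_to_unify_cards min_moves_to_unify_cards min_moves_to_unify_cards_alt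
  exact outer_foldl tcs [] hpre
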